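-- pv_equiv track=rewrite | github.com/tcliu1001/CS | Computational Thinking/loop/Hw.py | string_analysis
-- ===== SOURCE A (Python) =====
-- def string_analysis(x):
--     space=0
--     number=0
--     letter=0
--     for i in x:
--         if i ==" ":
--             space+=1
--         if i.isalpha()==True:
--             letter+=1
--         if i.isdigit()==True:
--             number+=1
--     z= "Space: "+str(space)+", Letter: "+str(letter)+", Number: "+str(number)
--     return z
-- ===== SOURCE B (Python) =====
-- def string_analysis(x):
--     counts = {}
--     for c in x:
--         counts[c] = counts.get(c, 0) + 1
--     space = counts.get(" ", 0)
--     letter = 0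
--     number = 0
--     for c, n in counts.items():
--         if c.isalpha():
--             letter += n
--         if c.isdigit():
--             number += n
--     return "Space: " + str(space) + ", Letter: " + str(letter) + ", Number: " + str(number)
-- ===== Notes on version B (the rewrite author's own statement) =====
-- stated objective: alternative
-- what changed: Builds a character histogram (dict char->count) in one pass, then classifies each DISTINCT character once and adds its multiplicity, instead of classifying every character of the string; space count is a single histogram lookup.
import Mathlib
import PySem

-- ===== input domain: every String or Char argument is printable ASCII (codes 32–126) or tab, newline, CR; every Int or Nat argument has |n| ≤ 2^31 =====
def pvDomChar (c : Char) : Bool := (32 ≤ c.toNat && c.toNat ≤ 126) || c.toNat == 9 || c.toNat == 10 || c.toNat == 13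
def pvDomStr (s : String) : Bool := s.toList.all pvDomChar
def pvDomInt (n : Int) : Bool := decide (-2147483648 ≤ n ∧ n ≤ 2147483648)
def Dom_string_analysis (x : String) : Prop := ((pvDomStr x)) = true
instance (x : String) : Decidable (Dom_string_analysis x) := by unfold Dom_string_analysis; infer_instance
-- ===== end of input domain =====

-- B builds a character histogram (dict char->count) once, then classifies each distinct character and adds its multiplicity, instead of classifying every character of the string; same output (alternative algorithm, similar cost).


-- ===== PORT A =====
-- one pass over the characters, three counters, three independent ifs per char
def string_analysis (x : String) : String :=
  let st := x.toList.foldl (fun (st : Int × Int × Int) i =>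
    let st := if i == ' ' then (st.1 + 1, st.2.1, st.2.2) else st
    let st := if PySem.Chars.isalpha i then (st.1, st.2.1 + 1, st.2.2) else st
    if PySem.Chars.isdigit i then (st.1, st.2.1, st.2.2 + 1) else st) (0, 0, 0)
  String.mk ("Space: ".toList ++ PySem.Int.toChars st.1 ++ ", Letter: ".toList
    ++ PySem.Int.toChars st.2.1 ++ ", Number: ".toList ++ PySem.Int.toChars st.2.2)

-- ===== PORT B =====
-- histogram pass (counts[c] = counts.get(c,0)+1), then one classification per DISTINCT char over counts.items()
def string_analysis_alt (x : String) : String :=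
  let counts := x.toList.foldl
    (fun (d : PySem.Dict Char Int) c => d.insert c (d.getD c 0 + 1)) PySem.Dict.empty
  let space : Int := counts.getD ' ' 0
  let ln := counts.items.foldl (fun (p : Int × Int) kv =>
    let p := if PySem.Chars.isalpha kv.1 then (p.1 + kv.2, p.2) else p
    if PySem.Chars.isdigit kv.1 then (p.1, p.2 + kv.2) else p) (0, 0)
  String.mk ("Space: ".toList ++ PySem.Int.toChars space ++ ", Letter: ".toList
    ++ PySem.Int.toChars ln.1 ++ ", Number: ".toList ++ PySem.Int.toChars ln.2)

-- ===== PRECONDITION & SPEC =====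
def Spec_string_analysis (x : String) (out : String) : Prop := out = string_analysis_alt x
instance (x : String) (out : String) : Decidable (Spec_string_analysis x out) := by unfold Spec_string_analysis; infer_instance

-- ===== CLAIM (what is proved, stated in full; the proofs are below) =====
def Claim_equal_string_analysis : Prop := ∀ (x : String), Dom_string_analysis x → Spec_string_analysis x (string_analysis x)

-- ===== LEMMAS AND PROOFS =====

-- A's single loop computes the three indicator sums
theorem sa_loop_eq (l : List Char) (s a n : Int) :
    l.foldl (fun (st : Int × Int × Int) i =>
      let st := if i == ' ' then (st.1 + 1, st.2.1, st.2.2) else st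
      let st := if PySem.Chars.isalpha i then (st.1, st.2.1 + 1, st.2.2) else st
      if PySem.Chars.isdigit i then (st.1, st.2.1, st.2.2 + 1) else st) (s, a, n)
    = (s + (l.map (fun c => if c == ' ' then (1 : Int) else 0)).sum,
       a + (l.map (fun c => if PySem.Chars.isalpha c then (1 : Int) else 0)).sum,
       n + (l.map (fun c => if PySem.Chars.isdigit c then (1 : Int) else 0)).sum) := by
  induction l generalizing s a n with
  | nil => simp
  | cons c t ih =>
    simp only [List.foldl_cons, List.map_cons, List.sum_cons]
    split_ifs <;>
      · rw [ih]
        refine Prod.ext ?_ (Prod.ext ?_ ?_) <;> simp <;> ring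

-- B's classification loop over a pairs list computes the two filtered value sums
theorem sa_pair_fold (ps : List (Char × Int)) (a b : Int) :
    ps.foldl (fun (p : Int × Int) kv =>
      let p := if PySem.Chars.isalpha kv.1 then (p.1 + kv.2, p.2) else p
      if PySem.Chars.isdigit kv.1 then (p.1, p.2 + kv.2) else p) (a, b)
    = (a + (ps.map (fun kv => if PySem.Chars.isalpha kv.1 then kv.2 else 0)).sum,
       b + (ps.map (fun kv => if PySem.Chars.isdigit kv.1 then kv.2 else 0)).sum) := by
  induction ps generalizing a b with
  | nil => simp
  | cons kv t ih =>
    simp only [List.foldl_cons, List.map_cons, List.sum_cons]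
    split_ifs <;>
      · rw [ih]
        refine Prod.ext ?_ ?_ <;> simp <;> ring

theorem sum_map_add_split {α : Type} (l : List α) (f g : α → Int) :
    (l.map (fun x => f x + g x)).sum = (l.map f).sum + (l.map g).sum := by
  induction l with
  | nil => simp
  | cons x t ih => simp [ih]; ring

-- in a Nodup list containing c, the indicator-at-c sum picks out v c
theorem sum_map_single (D : List Char) (hD : D.Nodup) (c : Char) (hc : c ∈ D) (v : Char → Int) :
    (D.map (fun k => if k = c then v k else 0)).sum = v c := by
  induction D with
  | nil => simp at hc
  | cons d t ih =>
    rw [List.map_cons, List.sum_cons]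
    by_cases he : d = c
    · subst he
      have ht : ∀ k ∈ t, (if k = d then v k else 0) = 0 := by
        intro k hk
        exact if_neg (fun e => (List.nodup_cons.mp hD).1 (by rwa [e] at hk))
      simp [List.map_congr_left ht]
    · have hct : c ∈ t := by
        rcases List.mem_cons.mp hc with h | h
        · exact absurd h.symm he
        · exact h
      simp [he, ih (List.nodup_cons.mp hD).2 hct]

-- summing P-indicator * multiplicity over the distinct characters = summing the P-indicator over the string
theorem sum_dedup_count (P : Char → Bool) (L D : List Char) (hD : D.Nodup)
    (hsub : ∀ c ∈ L, c ∈ D) :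
    (D.map (fun k => if P k then (L.count k : Int) else 0)).sum
      = (L.map (fun c => if P c then (1 : Int) else 0)).sum := by
  induction L with
  | nil => simp
  | cons c t ih =>
    have hc : c ∈ D := hsub c (List.mem_cons_self)
    have step : ∀ k, (if P k then ((c :: t).count k : Int) else 0)
        = (if P k then (t.count k : Int) else 0) + (if k = c then (if P k then 1 else 0) else 0) := by
      intro k
      simp only [List.count_cons]
      by_cases he : k = c
      · subst he
        by_cases hp : P k <;> simp [hp]
      · simp [he, Ne.symm he]
    calc (D.map (fun k => if P k then ((c :: t).count k : Int) else 0)).sum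
        = (D.map (fun k => (if P k then (t.count k : Int) else 0)
            + (if k = c then (if P k then 1 else 0) else 0))).sum := by
          exact congrArg List.sum (List.map_congr_left (fun k _ => step k))
      _ = (D.map (fun k => if P k then (t.count k : Int) else 0)).sum
            + (D.map (fun k => if k = c then (if P k then (1 : Int) else 0) else 0)).sum :=
          sum_map_add_split D _ _
      _ = (t.map (fun c => if P c then (1 : Int) else 0)).sum + (if P c then 1 else 0) := by
          rw [ih (fun a ha => hsub a (List.mem_cons_of_mem _ ha)),
            sum_map_single D hD c hc (fun k => if P k then (1 : Int) else 0)]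
      _ = _ := by rw [List.map_cons, List.sum_cons]; ring

-- the space indicator sum is the count of ' '
theorem sum_space_eq_count (L : List Char) :
    (L.map (fun c => if c == ' ' then (1 : Int) else 0)).sum = (L.count ' ' : Int) := by
  induction L with
  | nil => simp
  | cons c t ih =>
    rw [List.map_cons, List.sum_cons, ih, List.count_cons]
    by_cases h : c = ' ' <;> simp [h] <;> push_cast <;> ring

-- classifying each distinct character weighted by its multiplicity = classifying every character
theorem sum_classify (P : Char → Bool) (L : List Char) :
    (List.map ((fun kv : Char × Int => if P kv.1 then kv.2 else 0) ∘ fun k => (k, (L.count k : Int)))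
      (PySem.Set.ofList L)).sum
    = (L.map (fun c => if P c then (1 : Int) else 0)).sum := by
  rw [← PySem.List.dedup_eq_ofList]
  exact sum_dedup_count P L (PySem.List.dedup L) (PySem.List.nodup_dedup L)
    (fun c hc => (PySem.List.mem_dedup L c).mpr hc)

-- ===== VERDICT (by name: the statement is the Claim_ definition above) =====
theorem string_analysis_spec : Claim_equal_string_analysis := by
  intro x _
  unfold Spec_string_analysis string_analysis string_analysis_alt
  rw [PySem.Dict.foldl_insert_getD_add_one_eq_counter]
  simp only [sa_loop_eq, PySem.Dict.items_counter, sa_pair_fold, PySem.Dict.getD_counter,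
    zero_add, List.map_map]
  rw [sum_space_eq_count, sum_classify PySem.Chars.isalpha, sum_classify PySem.Chars.isdigit]
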